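-- pv_equiv track=rewrite | github.com/yurii-zinchuk/encrypted_chat | encryption/rsa.py | _into_blocks
-- ===== SOURCE A (Python) =====
-- NUMS_DICT = {
--     "Q": "10",
--     "W": "11",
--     "E": "12",
--     "R": "13",
--     "T": "14",
--     "Y": "15",
--     "U": "16",
--     "I": "17",
--     "O": "18",
--     "P": "19",
--     "A": "20",
--     "S": "21",
--     "D": "22",
--     "F": "23",
--     "G": "24",
--     "H": "25",
--     "J": "26",
--     "K": "27",
--     "L": "28",
--     "Z": "29",
--     "X": "30",
--     "C": "31",
--     "V": "32",
--     "B": "33",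
--     "N": "34",
--     "M": "35",
--     "q": "36",
--     "w": "37",
--     "e": "38",
--     "r": "39",
--     "t": "40",
--     "y": "41",
--     "u": "42",
--     "i": "43",
--     "o": "44",
--     "p": "45",
--     "a": "46",
--     "s": "47",
--     "d": "48",
--     "f": "49",
--     "g": "50",
--     "h": "51",
--     "j": "52",
--     "k": "53",
--     "l": "54",
--     "z": "55",
--     "x": "56",
--     "c": "57",
--     "v": "58",
--     "b": "59",
--     "n": "60",
--     "m": "61",
--     " ": "62",
--     ",": "63",
--     ".": "64",
--     "!": "65",
--     "?": "66",
--     "-": "67",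
--     "`": "68",
--     "'": "69",
--     '"': "70",
--     ";": "71",
--     ":": "72",
--     "(": "73",
--     ")": "74",
--     "/": "75",
--     "|": "76",
--     "_": "77",
--     "1": "78",
--     "2": "79",
--     "3": "80",
--     "4": "81",
--     "5": "82",
--     "6": "83",
--     "7": "84",
--     "8": "85",
--     "9": "86",
--     "0": "87",
-- }
--
-- def _into_blocks(msg: str) -> list[str]:
--     """Return message as a list of blocks, each
--     consisting of 3 characters (6 digits).
--     Last block has <= 3 characters.
--
--     Args:
--         msg (str): Message to break.
--
--     Returns:
--         list[str]: List of blocks.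
--     """
--     i = 3
--     blocks = [NUMS_DICT[char] for char in msg]
--     while i < len(blocks):
--         blocks.insert(i, "*")
--         i += 4
--     blocks = "".join(blocks).split("*")
--     return blocks
-- ===== SOURCE B (Python) =====
-- KEYS = "QWERTYUIOPASDFGHJKLZXCVBNMqwertyuiopasdfghjklzxcvbnm ,.!?-`'\";:()/|_1234567890"
--
--
-- def _into_blocks(msg: str) -> list[str]:
--     """One incremental pass: keep a list of blocks, start a new block at
--     every third character, and append each character's two-digit code
--     (10 + its keyboard-order rank) to the current block."""
--     result = ['']
--     for i, ch in enumerate(msg):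
--         if i and i % 3 == 0:
--             result.append('')
--         result[-1] += str(10 + KEYS.index(ch))
--     return result
-- ===== Notes on version B (the rewrite author's own statement) =====
-- stated objective: faster
-- what changed: Replaces A's dict lookup plus sentinel surgery (quadratic list.insert of '*' markers, join everything into one string, split it back on '*') with a single linear incremental pass over enumerate(msg) that starts a new block whenever the index is a nonzero multiple of 3 and appends each character's code, computed as str(10 + rank in a key string), to the current last block.
import Mathlib
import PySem

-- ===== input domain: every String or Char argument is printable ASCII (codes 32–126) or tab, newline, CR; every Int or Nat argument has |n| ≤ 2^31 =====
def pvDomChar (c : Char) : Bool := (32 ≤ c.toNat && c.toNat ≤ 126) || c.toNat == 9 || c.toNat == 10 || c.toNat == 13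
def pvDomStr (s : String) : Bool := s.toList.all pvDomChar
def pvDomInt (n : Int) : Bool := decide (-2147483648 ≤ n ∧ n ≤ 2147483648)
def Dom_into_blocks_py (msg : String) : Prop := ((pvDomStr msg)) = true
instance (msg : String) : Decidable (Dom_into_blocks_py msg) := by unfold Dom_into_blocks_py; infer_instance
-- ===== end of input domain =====

-- B replaces A's sentinel round-trip (insert "*" markers, join, split on "*") and its
-- dict literal by a single incremental pass over enumerate(msg) that grows the last
-- block in place and encodes each char as 10 + its rank in a key string; objective: faster (A's insert loop is quadratic, B's pass is linear; measured).

-- ===== PORT A =====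

-- module constant NUMS_DICT (all 77 keys distinct)
def numsDict : PySem.Dict Char String := PySem.Dict.mk
  [('Q', "10"), ('W', "11"), ('E', "12"), ('R', "13"), ('T', "14"), ('Y', "15"),
   ('U', "16"), ('I', "17"), ('O', "18"), ('P', "19"), ('A', "20"), ('S', "21"),
   ('D', "22"), ('F', "23"), ('G', "24"), ('H', "25"), ('J', "26"), ('K', "27"),
   ('L', "28"), ('Z', "29"), ('X', "30"), ('C', "31"), ('V', "32"), ('B', "33"),
   ('N', "34"), ('M', "35"), ('q', "36"), ('w', "37"), ('e', "38"), ('r', "39"),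
   ('t', "40"), ('y', "41"), ('u', "42"), ('i', "43"), ('o', "44"), ('p', "45"),
   ('a', "46"), ('s', "47"), ('d', "48"), ('f', "49"), ('g', "50"), ('h', "51"),
   ('j', "52"), ('k', "53"), ('l', "54"), ('z', "55"), ('x', "56"), ('c', "57"),
   ('v', "58"), ('b', "59"), ('n', "60"), ('m', "61"), (' ', "62"), (',', "63"),
   ('.', "64"), ('!', "65"), ('?', "66"), ('-', "67"), ('`', "68"), ('\'', "69"),
   ('"', "70"), (';', "71"), (':', "72"), ('(', "73"), (')', "74"), ('/', "75"),
   ('|', "76"), ('_', "77"), ('1', "78"), ('2', "79"), ('3', "80"), ('4', "81"),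
   ('5', "82"), ('6', "83"), ('7', "84"), ('8', "85"), ('9', "86"), ('0', "87")]

-- NUMS_DICT[char]; Python raises KeyError on a missing key -- Pre_ excludes exactly those
-- inputs, so the getD "" default is never reached on any admitted input
def codeStr (c : Char) : String := (numsDict.get? c).getD ""

-- the loop 'while i < len(blocks): blocks.insert(i, "*"); i += 4'  (i is 3, 7, 11, ...: a Nat)
def insLoop (bs : List String) (i : Nat) : List String :=
  if _h : i < bs.length then insLoop (PySem.List.insert bs (i : Int) "*") (i + 4) else bs
termination_by bs.length - i
decreasing_by simp only [PySem.List.length_insert]; omega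

-- blocks = [NUMS_DICT[char] for char in msg]; the insert loop; "".join(blocks).split("*")
def into_blocks_py (msg : String) : List String :=
  match PySem.Str.split? (PySem.Str.join "" (insLoop (msg.toList.map codeStr) 3)) "*" with
  | some r => r
  | none => []   -- unreachable: the separator "*" is nonempty

-- ===== PORT B =====

-- Source B: KEYS, the 77 encodable characters in code order
def keysB : String := "QWERTYUIOPASDFGHJKLZXCVBNMqwertyuiopasdfghjklzxcvbnm ,.!?-`'\";:()/|_1234567890"

-- str(10 + KEYS.index(ch)); Python raises ValueError on a missing char -- Pre_ excludes
-- exactly those inputs, so the "" default is never reached on any admitted input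
def codeB (c : Char) : String :=
  match PySem.List.index? keysB.toList c with
  | some k => PySem.Int.toStr (10 + (k : Int))
  | none => ""

-- loop body: if i and i % 3 == 0: result.append('');  result[-1] += str(10 + KEYS.index(ch))
def stepB (res : List String) (p : Int × Char) : List String :=
  let res' := if p.1 ≠ 0 ∧ PySem.Int.mod p.1 3 = 0 then res ++ [""] else res
  res'.dropLast ++ [(res'.getLast?.getD "") ++ codeB p.2]

def into_blocks_py_alt (msg : String) : List String :=
  (PySem.List.enumerate msg.toList).foldl stepB [""]

-- ===== PRECONDITION & SPEC =====
-- the keys of NUMS_DICT, as a plain list of characters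
def numsKeys : List Char := ['Q', 'W', 'E', 'R', 'T', 'Y', 'U', 'I', 'O', 'P', 'A', 'S', 'D', 'F', 'G', 'H', 'J', 'K', 'L', 'Z', 'X', 'C', 'V', 'B', 'N', 'M', 'q', 'w', 'e', 'r', 't', 'y', 'u', 'i', 'o', 'p', 'a', 's', 'd', 'f', 'g', 'h', 'j', 'k', 'l', 'z', 'x', 'c', 'v', 'b', 'n', 'm', ' ', ',', '.', '!', '?', '-', '`', '\'', '"', ';', ':', '(', ')', '/', '|', '_', '1', '2', '3', '4', '5', '6', '7', '8', '9', '0']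

-- Pre_: every character of msg is a key of NUMS_DICT (otherwise Python A raises KeyError,
-- and Python B raises ValueError on the same inputs)
def Pre_into_blocks_py (msg : String) : Prop := msg.toList.all (fun c => numsKeys.contains c) = true
instance (msg : String) : Decidable (Pre_into_blocks_py msg) := by unfold Pre_into_blocks_py; infer_instance

def pvWitness_into_blocks_py : String := "Hi!"

def Spec_into_blocks_py (msg : String) (out : List String) : Prop := out = into_blocks_py_alt msg
instance (msg : String) (out : List String) : Decidable (Spec_into_blocks_py msg out) := by unfold Spec_into_blocks_py; infer_instance

-- ===== CLAIM (what is proved, stated in full; the proofs are below) =====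
def Claim_equal_into_blocks_py : Prop := ∀ (msg : String), Dom_into_blocks_py msg → Pre_into_blocks_py msg → Spec_into_blocks_py msg (into_blocks_py msg)

-- ===== LEMMAS AND PROOFS =====

def tmark (l : List String) : List String :=
  if _h : l = [] then [] else "*" :: (l.take 3 ++ tmark (l.drop 3))
termination_by l.length
decreasing_by
  rw [List.length_drop]
  cases l with
  | nil => exact absurd rfl _h
  | cons a t => simp only [List.length_cons]; omega

def partsJ (l : List String) : List (List Char) :=
  if _h : l = [] then [] else ((l.take 3).map String.toList).flatten :: partsJ (l.drop 3)
termination_by l.length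
decreasing_by
  rw [List.length_drop]
  cases l with
  | nil => exact absurd rfl _h
  | cons a t => simp only [List.length_cons]; omega

def interStar : List (List Char) → List Char
  | [] => []
  | [b] => b
  | b :: c :: rest => b ++ '*' :: interStar (c :: rest)

-- the common normal form both ports are reduced to
def canonOf (m : List String) : List String :=
  (if partsJ m = [] then [[]] else partsJ m).map String.ofList

theorem tmark_nil : tmark [] = [] := by rw [tmark]; rfl

theorem tmark_ne_nil (l : List String) (h : l ≠ []) :
    tmark l = "*" :: (l.take 3 ++ tmark (l.drop 3)) := by
  rw [tmark, dif_neg h]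

theorem partsJ_nil : partsJ [] = [] := by rw [partsJ]; rfl

theorem partsJ_ne_nil (l : List String) (h : l ≠ []) :
    partsJ l = ((l.take 3).map String.toList).flatten :: partsJ (l.drop 3) := by
  rw [partsJ, dif_neg h]

theorem partsJ_cons_of_ne_nil (l : List String) (h : l ≠ []) : partsJ l ≠ [] := by
  rw [partsJ_ne_nil l h]; simp

theorem interStar_cons (b : List Char) (l : List (List Char)) (h : l ≠ []) :
    interStar (b :: l) = b ++ '*' :: interStar l := by
  cases l with
  | nil => exact absurd rfl h
  | cons c rest => rw [interStar]

theorem insLoop_eq (bs : List String) (i : Nat) :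
    insLoop bs i = bs.take i ++ tmark (bs.drop i) := by
  induction bs, i using insLoop.induct with
  | case1 bs i h ih =>
    rw [PySem.List.insert_natCast bs i "*" (Nat.le_of_lt h)] at ih
    rw [insLoop, dif_pos h, PySem.List.insert_natCast bs i "*" (Nat.le_of_lt h), ih]
    have hlen : (bs.take i).length = i := List.length_take_of_le (Nat.le_of_lt h)
    have hdrop : bs.drop i ≠ [] := by
      intro hd
      have := List.drop_eq_nil_iff.mp hd
      omega
    rw [List.take_append, List.drop_append, hlen]
    rw [List.take_of_length_le (by omega : (bs.take i).length ≤ i + 4),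
        List.drop_eq_nil_of_le (by omega : (bs.take i).length ≤ i + 4)]
    have h4 : i + 4 - i = 4 := by omega
    rw [h4]
    rw [tmark_ne_nil _ hdrop]
    simp [List.drop_drop]
  | case2 bs i h =>
    rw [insLoop, dif_neg h]
    have hd : bs.drop i = [] := List.drop_eq_nil_of_le (by omega)
    rw [hd, List.take_of_length_le (by omega), tmark_nil, List.append_nil]

theorem flat_marked (bs : List String) :
    ((bs.take 3 ++ tmark (bs.drop 3)).map String.toList).flatten = interStar (partsJ bs) := by
  induction bs using partsJ.induct with
  | case1 =>
    simp [tmark_nil, partsJ_nil, interStar]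
  | case2 bs h ih =>
    by_cases hd : bs.drop 3 = []
    · rw [partsJ_ne_nil _ h, hd, partsJ_nil, tmark_nil]
      simp [interStar]
    · rw [partsJ_ne_nil _ h, tmark_ne_nil _ hd]
      rw [interStar_cons _ _ (partsJ_cons_of_ne_nil _ hd)]
      rw [← ih]
      simp

theorem go_zero (sep l cur acc) :
    PySem.Chars.splitOn.go sep 0 l cur acc = ((cur.reverse ++ l) :: acc).reverse := rfl

theorem go_succ_nil (sep f cur acc) :
    PySem.Chars.splitOn.go sep (f + 1) [] cur acc = (cur.reverse :: acc).reverse := rfl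

theorem go_succ_cons (sep f c rest cur acc) :
    PySem.Chars.splitOn.go sep (f + 1) (c :: rest) cur acc =
      if sep.isPrefixOf (c :: rest)
      then PySem.Chars.splitOn.go sep f (List.drop sep.length (c :: rest)) [] (cur.reverse :: acc)
      else PySem.Chars.splitOn.go sep f rest (c :: cur) acc := rfl

theorem star_isPrefix (c : Char) (rest : List Char) :
    List.isPrefixOf ['*'] (c :: rest) = ('*' == c) := by
  have h : List.isPrefixOf ['*'] (c :: rest) = ('*' == c && true) := rfl
  simpa using h

theorem star_isPrefix_false (c : Char) (rest : List Char) (hc : c ≠ '*') :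
    List.isPrefixOf ['*'] (c :: rest) = false := by
  rw [star_isPrefix]
  exact beq_eq_false_iff_ne.mpr (Ne.symm hc)

theorem go_nostar (fuel : Nat) : ∀ (l cur : List Char) (acc : List (List Char)), '*' ∉ l →
    PySem.Chars.splitOn.go ['*'] fuel l cur acc = ((cur.reverse ++ l) :: acc).reverse := by
  induction fuel with
  | zero => intro l cur acc _; exact go_zero _ _ _ _
  | succ f ih =>
    intro l cur acc h
    cases l with
    | nil => simp [go_succ_nil]
    | cons c rest =>
      have hc : c ≠ '*' := by intro hc; exact h (hc ▸ List.mem_cons_self)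
      rw [go_succ_cons, star_isPrefix_false c rest hc]
      simp only [Bool.false_eq_true, if_false]
      rw [ih rest (c :: cur) acc (fun hm => h (List.mem_cons_of_mem _ hm))]
      simp

theorem go_star (a : List Char) : ∀ (fuel : Nat) (rest cur : List Char) (acc : List (List Char)),
    '*' ∉ a → a.length < fuel →
    PySem.Chars.splitOn.go ['*'] fuel (a ++ '*' :: rest) cur acc =
      PySem.Chars.splitOn.go ['*'] (fuel - (a.length + 1)) rest [] ((cur.reverse ++ a) :: acc) := by
  induction a with
  | nil =>
    intro fuel rest cur acc _ hf
    cases fuel with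
    | zero => omega
    | succ f =>
      simp only [List.nil_append]
      rw [go_succ_cons]
      have hp : List.isPrefixOf ['*'] ('*' :: rest) = true := by
        rw [star_isPrefix]; simp
      rw [hp]
      simp
  | cons c a' ih =>
    intro fuel rest cur acc h hf
    cases fuel with
    | zero => omega
    | succ f =>
      have hc : c ≠ '*' := by intro hc; exact h (hc ▸ List.mem_cons_self)
      simp only [List.cons_append]
      rw [go_succ_cons, star_isPrefix_false c _ hc]
      simp only [Bool.false_eq_true, if_false]
      rw [ih f rest (c :: cur) acc (fun hm => h (List.mem_cons_of_mem _ hm)) (by rw [List.length_cons] at hf; omega)]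
      have h1 : f + 1 - ((c :: a').length + 1) = f - (a'.length + 1) := by
        rw [List.length_cons]; omega
      rw [h1]
      simp

theorem go_interStar (parts : List (List Char)) : ∀ (acc : List (List Char)), parts ≠ [] →
    (∀ p ∈ parts, '*' ∉ p) →
    PySem.Chars.splitOn.go ['*'] ((interStar parts).length + 1) (interStar parts) [] acc =
      acc.reverse ++ parts := by
  induction parts with
  | nil => intro _ h _; exact absurd rfl h
  | cons p l ih =>
    intro acc _ hstar
    cases l with
    | nil =>
      rw [interStar, go_nostar _ _ _ _ (hstar p List.mem_cons_self)]
      simp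
    | cons q rest =>
      rw [interStar_cons p _ (by simp)]
      rw [go_star p _ _ _ _ (hstar p List.mem_cons_self) (by simp only [List.length_append, List.length_cons]; omega)]
      have hfe : (p ++ '*' :: interStar (q :: rest)).length + 1 - (p.length + 1) =
          (interStar (q :: rest)).length + 1 := by
        simp only [List.length_append, List.length_cons]; omega
      rw [hfe]
      have hacc : ([] : List Char).reverse ++ p = p := by simp
      rw [hacc]
      rw [ih (p :: acc) (by simp) (fun r hr => hstar r (List.mem_cons_of_mem _ hr))]
      simp

theorem splitOn_interStar (parts : List (List Char)) (hne : parts ≠ [])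
    (hstar : ∀ p ∈ parts, '*' ∉ p) :
    PySem.Chars.splitOn (interStar parts) ['*'] = parts := by
  rw [PySem.Chars.splitOn]
  have h := go_interStar parts [] hne hstar
  have h2 : ([] : List (List Char)).reverse ++ parts = parts := by simp
  rw [h2] at h
  exact h

theorem values_nostar : ∀ v ∈ numsDict.values, '*' ∉ v.toList := by decide

theorem code_nostar (c : Char) (h : numsDict.contains c = true) : '*' ∉ (codeStr c).toList := by
  rw [PySem.Dict.contains_eq_isSome_get?] at h
  obtain ⟨v, hv⟩ := Option.isSome_iff_exists.mp h
  have hmem : v ∈ numsDict.values :=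
    List.mem_map_of_mem (PySem.Dict.mem_items_of_get?_eq_some numsDict hv)
  rw [codeStr, hv, Option.getD_some]
  exact values_nostar v hmem

theorem keys_eq : numsDict.keys = numsKeys := by decide

theorem keys_contains (c : Char) (h : c ∈ numsKeys) : numsDict.contains c = true := by
  rw [PySem.Dict.contains_eq_decide_mem_keys, keys_eq]
  exact decide_eq_true h

theorem partsJ_nostar (bs : List String) (h : ∀ s ∈ bs, '*' ∉ s.toList) :
    ∀ p ∈ partsJ bs, '*' ∉ p := by
  induction bs using partsJ.induct with
  | case1 => simp [partsJ_nil]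
  | case2 bs hb ih =>
    intro p hp
    rw [partsJ_ne_nil _ hb] at hp
    rcases List.mem_cons.mp hp with hp | hp
    · subst hp
      intro hm
      obtain ⟨l, hl, hml⟩ := List.mem_flatten.mp hm
      obtain ⟨s, hs, rfl⟩ := List.mem_map.mp hl
      exact h s (List.mem_of_mem_take hs) hml
    · exact ih (fun s hs => h s (List.mem_of_mem_drop hs)) p hp

theorem join_nil_sep (ps : List (List Char)) : PySem.Chars.join [] ps = ps.flatten := by
  induction ps with
  | nil => rfl
  | cons a t ih =>
    cases t with
    | nil =>
      rw [PySem.Chars.join, List.intercalate]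
      simp
    | cons b r =>
      rw [PySem.Chars.join] at ih ⊢
      rw [List.intercalate, List.intersperse_cons₂, List.flatten_cons, List.flatten_cons]
      rw [List.intercalate] at ih
      simp [ih]

theorem str_join_eq (l : List String) :
    PySem.Str.join "" l = String.ofList ((l.map String.toList).flatten) := by
  rw [PySem.Str.join]
  have h0 : ("" : String).toList = [] := rfl
  rw [h0, join_nil_sep]

theorem toList_str_join (l : List String) :
    (PySem.Str.join "" l).toList = (l.map String.toList).flatten := by
  rw [str_join_eq, String.toList_ofList]

theorem portA_eq (msg : String) (h : ∀ c ∈ msg.toList, numsDict.contains c = true) :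
    into_blocks_py msg = canonOf (msg.toList.map codeStr) := by
  have hstar : ∀ s ∈ msg.toList.map codeStr, '*' ∉ s.toList := by
    intro s hs
    obtain ⟨c, hc, rfl⟩ := List.mem_map.mp hs
    exact code_nostar c (h c hc)
  rw [into_blocks_py, PySem.Str.split?, PySem.Chars.split?, canonOf]
  have hsep : ("*" : String).toList = ['*'] := rfl
  rw [hsep]
  simp only [List.isEmpty_cons, Bool.false_eq_true, if_false]
  rw [insLoop_eq, toList_str_join, flat_marked]
  by_cases hp : partsJ (msg.toList.map codeStr) = []
  · rw [hp, if_pos rfl]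
    simp [interStar, PySem.Chars.splitOn, go_succ_nil]
  · rw [if_neg hp, splitOn_interStar _ hp (partsJ_nostar _ hstar)]
    simp

-- ----- B side -----

theorem codeB_eq_codeStr (c : Char) (h : c ∈ numsKeys) : codeB c = codeStr c := by
  fin_cases h <;> decide

theorem partsJ_snoc (m : List String) (s : String) :
    partsJ (m ++ [s]) =
      if m.length % 3 = 0 then partsJ m ++ [s.toList]
      else (partsJ m).dropLast ++ [((partsJ m).getLast?.getD []) ++ s.toList] := by
  induction m using partsJ.induct with
  | case1 =>
    rw [partsJ_nil]
    simp only [List.nil_append, List.length_nil]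
    rw [partsJ_ne_nil [s] (by simp)]
    simp [partsJ_nil]
  | case2 m hm ih =>
    by_cases hlt : m.length < 3
    · have hne0 : m.length ≠ 0 := by simpa [List.length_eq_zero_iff] using hm
      rw [if_neg (by omega)]
      rw [partsJ_ne_nil (m ++ [s]) (by simp)]
      rw [List.take_of_length_le (by simp; omega), List.drop_eq_nil_of_le (by simp; omega), partsJ_nil]
      rw [partsJ_ne_nil m hm, List.take_of_length_le (by omega), List.drop_eq_nil_of_le (by omega), partsJ_nil]
      simp
    · have h3 : 3 ≤ m.length := by omega
      rw [partsJ_ne_nil (m ++ [s]) (by simp)]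
      rw [List.take_append_of_le_length h3, List.drop_append_of_le_length h3, ih]
      have hmod : (m.drop 3).length % 3 = m.length % 3 := by
        rw [List.length_drop]; omega
      by_cases hz : m.length % 3 = 0
      · rw [if_pos (by rw [hmod]; exact hz), if_pos hz, partsJ_ne_nil m hm]
        simp
      · rw [if_neg (by rw [hmod]; exact hz), if_neg hz, partsJ_ne_nil m hm]
        have hd3 : m.drop 3 ≠ [] := by
          intro h
          have := List.drop_eq_nil_iff.mp h
          omega
        have hp : partsJ (m.drop 3) ≠ [] := partsJ_cons_of_ne_nil _ hd3
        cases hpd : partsJ (m.drop 3) with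
        | nil => exact absurd hpd hp
        | cons x xs => simp

theorem stepB_canon (m : List String) (c : Char) :
    stepB (canonOf m) ((m.length : Int), c) = canonOf (m ++ [codeB c]) := by
  by_cases hm : m = []
  · subst hm
    simp [stepB, canonOf, partsJ_nil, partsJ_ne_nil [codeB c] (by simp)]
  · have hne : partsJ m ≠ [] := partsJ_cons_of_ne_nil m hm
    have hlen0 : (m.length : Int) ≠ 0 := by
      simpa [List.length_eq_zero_iff] using hm
    have hC : canonOf (m ++ [codeB c]) = (partsJ (m ++ [codeB c])).map String.ofList := by
      rw [canonOf, if_neg (partsJ_cons_of_ne_nil _ (by simp))]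
    rw [canonOf, if_neg hne, hC, partsJ_snoc m (codeB c)]
    by_cases hz : m.length % 3 = 0
    · rw [if_pos hz]
      have hcond : (((m.length : Int), c).1 ≠ 0 ∧ PySem.Int.mod ((m.length : Int), c).1 3 = 0) := by
        refine ⟨hlen0, ?_⟩
        show PySem.Int.mod ((m.length : Int)) 3 = 0
        rw [PySem.Int.mod_eq_zero_iff_dvd]
        omega
      simp only [stepB]
      rw [if_pos hcond]
      simp
    · rw [if_neg hz]
      have hcond : ¬ (((m.length : Int), c).1 ≠ 0 ∧ PySem.Int.mod ((m.length : Int), c).1 3 = 0) := by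
        rintro ⟨-, hmod⟩
        rw [show PySem.Int.mod (((m.length : Int), c).1) 3 = PySem.Int.mod ((m.length : Int)) 3 from rfl,
            PySem.Int.mod_eq_zero_iff_dvd] at hmod
        omega
      simp only [stepB]
      rw [if_neg hcond]
      cases hpl : (partsJ m).getLast? with
      | none => exact absurd (List.getLast?_eq_none_iff.mp hpl) hne
      | some L =>
        rw [List.getLast?_map, hpl, ← List.map_dropLast]
        simp

theorem foldB (rest : List Char) : ∀ (cs : List Char),
    (PySem.List.enumerate rest (cs.length : Int)).foldl stepB (canonOf (cs.map codeB)) =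
      canonOf ((cs ++ rest).map codeB) := by
  induction rest with
  | nil => intro cs; simp [PySem.List.enumerate_nil]
  | cons c rest ih =>
    intro cs
    rw [PySem.List.enumerate_cons, List.foldl_cons]
    have hlen : ((cs.map codeB).length : Int) = (cs.length : Int) := by simp
    rw [← hlen, stepB_canon]
    have hm : cs.map codeB ++ [codeB c] = (cs ++ [c]).map codeB := by simp
    have h1 : ((cs.map codeB).length : Int) + 1 = (((cs ++ [c]).length : Nat) : Int) := by simp
    rw [hm, h1, ih (cs ++ [c])]
    simp

theorem portB_eq (msg : String) :
    into_blocks_py_alt msg = canonOf (msg.toList.map codeB) := by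
  rw [into_blocks_py_alt]
  have h := foldB msg.toList []
  simpa [canonOf, partsJ_nil] using h

-- ===== VERDICT (by name: the statement is the Claim_ definition above) =====
theorem into_blocks_py_spec : Claim_equal_into_blocks_py := by
  intro msg _ hpre
  unfold Spec_into_blocks_py
  unfold Pre_into_blocks_py at hpre
  rw [List.all_eq_true] at hpre
  have hpre : ∀ c ∈ msg.toList, c ∈ numsKeys := fun c hc => by
    simpa using hpre c hc
  rw [portA_eq msg (fun c hc => keys_contains c (hpre c hc)), portB_eq]
  congr 1
  exact (List.map_congr_left (fun c hc => (codeB_eq_codeStr c (hpre c hc)).symm))
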